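-- pv_equiv track=rewrite | github.com/JEREMYKARRA/IR-Assignment1 | experiment2_hybrid.py | generate_correction_combinations
-- ===== SOURCE A (Python) =====
-- from itertools import product
--
-- def generate_correction_combinations(all_corrections, max_combinations=10):
--     combinations = list(product(*[[corr[0] for corr in word_corrs] for word_corrs in all_corrections]))
--     distances = []
--
--     for combo in combinations:
--         total_distance = sum(min(corr[1] for corr in word_corrs if corr[0] == word)
--                         for word, word_corrs in zip(combo, all_corrections))
--         distances.append((combo, total_distance))
--
--     # Sort by total distance and limit results
--     distances.sort(key=lambda x: x[1])
--     return distances[:max_combinations]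
-- ===== SOURCE B (Python) =====
-- def generate_correction_combinations(all_corrections, max_combinations=10):
--     # Fuse distance computation into the product expansion: precompute each
--     # word list's minimal distance per word once, then extend partial
--     # combinations with running totals (no per-combination min re-scan).
--     pairs = [((), 0)]
--     for word_corrs in all_corrections:
--         mins = {}
--         for w, d in word_corrs:
--             if w not in mins or d < mins[w]:
--                 mins[w] = d
--         pairs = [(combo + (w,), total + mins[w])
--                  for combo, total in pairs
--                  for w, _ in word_corrs]
--     pairs.sort(key=lambda p: p[1])
--     return pairs[:max_combinations]
-- ===== Notes on version B (the rewrite author's own statement) =====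
-- stated objective: faster
-- what changed: B precomputes each word list's per-word minimal distance once and accumulates totals while expanding the product incrementally, instead of materialising all combinations first and re-scanning every word list with a min() generator for each combination.
import Mathlib
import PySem

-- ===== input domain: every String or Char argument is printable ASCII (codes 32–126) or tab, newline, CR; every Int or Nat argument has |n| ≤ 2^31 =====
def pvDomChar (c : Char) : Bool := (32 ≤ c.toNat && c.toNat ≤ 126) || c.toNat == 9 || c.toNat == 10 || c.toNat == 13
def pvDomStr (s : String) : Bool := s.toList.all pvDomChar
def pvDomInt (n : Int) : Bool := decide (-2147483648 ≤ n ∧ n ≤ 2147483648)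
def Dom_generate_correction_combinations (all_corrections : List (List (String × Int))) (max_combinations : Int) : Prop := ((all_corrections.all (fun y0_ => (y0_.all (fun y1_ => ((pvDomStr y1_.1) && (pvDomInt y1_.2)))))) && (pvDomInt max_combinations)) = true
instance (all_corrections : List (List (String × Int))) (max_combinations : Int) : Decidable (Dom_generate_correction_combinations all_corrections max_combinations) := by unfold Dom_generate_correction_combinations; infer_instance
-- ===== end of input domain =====

-- B fuses the per-word minimal distances (computed once per word list) into an incremental
-- product expansion, removing A's per-combination min() re-scan; same sorted, truncated result.


-- ===== PORT A =====
-- itertools.product(*lists) in product order (first list varies slowest)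
def pyProduct {α : Type} : List (List α) → List (List α)
  | [] => [[]]
  | xs :: rest => xs.flatMap (fun x => (pyProduct rest).map (fun t => x :: t))

-- min(corr[1] for corr in word_corrs if corr[0] == word); the generator is never
-- empty when word comes from word_corrs itself, so the .getD 0 default is unreachable there
def minMatch (word_corrs : List (String × Int)) (word : String) : Int :=
  (PySem.List.min? ((word_corrs.filter (fun corr => corr.1 == word)).map (fun corr => corr.2))
    (fun x => x)).getD 0

def generate_correction_combinations (all_corrections : List (List (String × Int))) (max_combinations : Int) : List (List String × Int) :=
  let combinations := pyProduct (all_corrections.map (fun word_corrs => word_corrs.map (fun corr => corr.1)))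
  -- for combo in combinations: distances.append((combo, sum(min ... for word, word_corrs in zip(combo, all_corrections))))
  let distances := combinations.map (fun combo =>
    (combo, (combo.zip all_corrections).foldl (fun s p => s + minMatch p.2 p.1) 0))
  PySem.List.slice (PySem.List.sorted distances (fun x => x.2)) none (some max_combinations)

-- ===== PORT B =====
-- mins = {}; for w, d in word_corrs: if w not in mins or d < mins[w]: mins[w] = d
def minDict (word_corrs : List (String × Int)) : PySem.Dict String Int :=
  word_corrs.foldl (fun m c =>
    match m.get? c.1 with
    | none => m.insert c.1 c.2
    | some v => if c.2 < v then m.insert c.1 c.2 else m) PySem.Dict.empty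

def generate_correction_combinations_alt (all_corrections : List (List (String × Int))) (max_combinations : Int) : List (List String × Int) :=
  let pairs := all_corrections.foldl (fun pairs word_corrs =>
    let mins := minDict word_corrs
    -- mins[w] never raises: w is a key of word_corrs, hence of mins; getD 0 is unreachable
    pairs.flatMap (fun p => word_corrs.map (fun c => (p.1 ++ [c.1], p.2 + mins.getD c.1 0))))
    [([], 0)]
  PySem.List.slice (PySem.List.sorted pairs (fun p => p.2)) none (some max_combinations)

-- ===== PRECONDITION & SPEC =====
def Spec_generate_correction_combinations (all_corrections : List (List (String × Int))) (max_combinations : Int) (out : List (List String × Int)) : Prop := out = generate_correction_combinations_alt all_corrections max_combinations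
instance (all_corrections : List (List (String × Int))) (max_combinations : Int) (out : List (List String × Int)) : Decidable (Spec_generate_correction_combinations all_corrections max_combinations out) := by unfold Spec_generate_correction_combinations; infer_instance

-- ===== CLAIM (what is proved, stated in full; the proofs are below) =====
def Claim_equal_generate_correction_combinations : Prop := ∀ (all_corrections : List (List (String × Int))) (max_combinations : Int), Dom_generate_correction_combinations all_corrections max_combinations → Spec_generate_correction_combinations all_corrections max_combinations (generate_correction_combinations all_corrections max_combinations)

-- ===== LEMMAS AND PROOFS =====

-- A's pre-sort list of (combination, total distance) pairs
def distA (ac : List (List (String × Int))) : List (List String × Int) :=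
  (pyProduct (ac.map (fun word_corrs => word_corrs.map (fun corr => corr.1)))).map (fun combo =>
    (combo, (combo.zip ac).foldl (fun s p => s + minMatch p.2 p.1) 0))

-- running minimum over an Option accumulator (the dict fold's per-key effect)
def omin (o : Option Int) (x : Int) : Option Int :=
  some (match o with | none => x | some v => min v x)

lemma foldl_omin_some (l : List Int) (v : Int) :
    l.foldl omin (some v) = some (l.foldl min v) := by
  induction l generalizing v with
  | nil => rfl
  | cons x t ih => simp [List.foldl, omin, ih]

lemma min?_id_eq_foldl_omin (l : List Int) :
    PySem.List.min? l (fun x => x) = l.foldl omin none := by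
  cases l with
  | nil => rfl
  | cons x t => rw [PySem.List.min?_id_cons]; simp [List.foldl, omin, foldl_omin_some]

lemma minDict_get? (wc : List (String × Int)) (m : PySem.Dict String Int) (w : String) :
    (wc.foldl (fun m c =>
      match m.get? c.1 with
      | none => m.insert c.1 c.2
      | some v => if c.2 < v then m.insert c.1 c.2 else m) m).get? w
    = (wc.filter (fun c => c.1 == w)).foldl (fun o c => omin o c.2) (m.get? w) := by
  induction wc generalizing m with
  | nil => rfl
  | cons c t ih =>
    rw [List.foldl_cons, ih, List.filter_cons]
    by_cases hw : c.1 = w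
    · have hbe : (c.1 == w) = true := beq_iff_eq.mpr hw
      rw [hbe, if_pos rfl, List.foldl_cons]
      congr 1
      subst hw
      cases hm : m.get? c.1 with
      | none => simp [omin]
      | some v =>
        by_cases hlt : c.2 < v
        · simp only [if_pos hlt, PySem.Dict.get?_insert, omin]
          rw [min_eq_right hlt.le]
          simp
        · simp only [if_neg hlt, omin]
          rw [hm, min_eq_left (by omega)]
    · have hbe : (c.1 == w) = false := beq_eq_false_iff_ne.mpr hw
      have hw' : ¬ w = c.1 := fun h => hw h.symm
      rw [hbe, if_neg (by simp)]
      congr 1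
      cases hm : m.get? c.1 with
      | none => simp [PySem.Dict.get?_insert, hw']
      | some v =>
        by_cases hlt : c.2 < v
        · simp [hlt, PySem.Dict.get?_insert, hw']
        · simp [hlt]

lemma minDict_getD (wc : List (String × Int)) (w : String) :
    (minDict wc).getD w 0 = minMatch wc w := by
  rw [PySem.Dict.getD_eq_get?_getD, minDict, minDict_get?, PySem.Dict.get?_empty]
  unfold minMatch
  rw [min?_id_eq_foldl_omin, List.foldl_map]

lemma distA_nil : distA [] = [([], (0 : Int))] := rfl

lemma distA_cons (wc : List (String × Int)) (rest : List (List (String × Int))) :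
    distA (wc :: rest)
    = wc.flatMap (fun c => (distA rest).map (fun q => (c.1 :: q.1, minMatch wc c.1 + q.2))) := by
  unfold distA
  simp only [List.map_cons, pyProduct, List.map_flatMap, List.flatMap_map, List.map_map]
  refine List.flatMap_congr (fun c _ => ?_)
  refine List.map_congr_left (fun t _ => ?_)
  simp only [Function.comp, List.zip_cons_cons, List.foldl_cons, zero_add]
  simp [PySem.List.foldl_add]

-- the incremental expansion, started from any partial list of (combo, total) pairs
lemma expand_eq (ac : List (List (String × Int))) (pairs : List (List String × Int)) :
    ac.foldl (fun pairs word_corrs =>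
      let mins := minDict word_corrs
      pairs.flatMap (fun p => word_corrs.map (fun c => (p.1 ++ [c.1], p.2 + mins.getD c.1 0)))) pairs
    = pairs.flatMap (fun p => (distA ac).map (fun q => (p.1 ++ q.1, p.2 + q.2))) := by
  induction ac generalizing pairs with
  | nil =>
    simp [distA_nil]
  | cons wc rest ih =>
    simp only [List.foldl_cons]
    rw [ih]
    simp only [List.flatMap_assoc, List.flatMap_map, distA_cons]
    refine List.flatMap_congr (fun p _ => ?_)
    simp only [List.map_flatMap]
    refine List.flatMap_congr (fun c _ => ?_)
    simp only [List.map_map]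
    refine List.map_congr_left (fun q _ => ?_)
    simp only [Function.comp_apply, Prod.mk.injEq, List.append_assoc, List.cons_append,
      List.nil_append, minDict_getD]
    exact ⟨trivial, by omega⟩

lemma pairs_eq_distA (ac : List (List (String × Int))) :
    ac.foldl (fun pairs word_corrs =>
      let mins := minDict word_corrs
      pairs.flatMap (fun p => word_corrs.map (fun c => (p.1 ++ [c.1], p.2 + mins.getD c.1 0))))
      [([], 0)]
    = distA ac := by
  rw [expand_eq]
  simp

-- ===== VERDICT (by name: the statement is the Claim_ definition above) =====
theorem generate_correction_combinations_spec : Claim_equal_generate_correction_combinations := by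
  intro ac k _
  unfold Spec_generate_correction_combinations
  unfold generate_correction_combinations generate_correction_combinations_alt
  rw [pairs_eq_distA]
  rfl
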